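-- pv_equiv track=rewrite | github.com/DenellJ/denell_j | app.py | _pick_code_col
-- ===== SOURCE A (Python) =====
-- def _pick_code_col(cols):
--     pri = ["item code", "item no.", "item number", "itemno", "item"]
--     lower = {c: c.lower() for c in cols}
--     # exact priorities
--     for target in pri:
--         for c in cols:
--             if lower[c] == target:
--                 return c
--     # contains-based fallback
--     for c in cols:
--         lc = lower[c]
--         if ("item" in lc and "code" in lc) or ("item" in lc and "no" in lc):
--             return c
--     # last resort: first column
--     return cols[0]
-- ===== SOURCE B (Python) =====
-- def _pick_code_col(cols):
--     pri = ["item code", "item no.", "item number", "itemno", "item"]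
--
--     def rank(c):
--         lc = c.lower()
--         if lc in pri:
--             return pri.index(lc)
--         if "item" in lc and ("code" in lc or "no" in lc):
--             return len(pri)
--         return len(pri) + 1
--
--     best = cols[0]
--     best_rank = rank(best)
--     for c in cols[1:]:
--         r = rank(c)
--         if r < best_rank:
--             best, best_rank = c, r
--     return best
-- ===== Notes on version B (the rewrite author's own statement) =====
-- stated objective: faster
-- what changed: B replaces A's staged scans (one scan of cols per priority target over a prebuilt lower dict, then a fallback scan, then cols[0]) by a single pass: each column is ranked once (priority index, 5 = contains-fallback pattern, 6 = none) and a running-minimum fold with strict '<' keeps the first column of minimal rank; an all-rank-6 list yields cols[0].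
import Mathlib
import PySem

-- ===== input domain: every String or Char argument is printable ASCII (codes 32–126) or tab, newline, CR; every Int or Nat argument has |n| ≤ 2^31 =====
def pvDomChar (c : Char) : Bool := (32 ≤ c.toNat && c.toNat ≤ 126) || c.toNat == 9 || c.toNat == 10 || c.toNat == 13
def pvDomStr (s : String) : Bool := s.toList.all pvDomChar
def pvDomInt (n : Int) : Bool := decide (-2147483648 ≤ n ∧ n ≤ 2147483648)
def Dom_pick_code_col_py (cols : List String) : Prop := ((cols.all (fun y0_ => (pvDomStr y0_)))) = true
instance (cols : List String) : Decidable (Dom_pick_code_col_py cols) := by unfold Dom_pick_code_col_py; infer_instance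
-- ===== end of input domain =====

-- B replaces A's staged scans (one scan per priority target, then a fallback scan, then cols[0])
-- by a single running-minimum pass over ranked columns; same result, one traversal.

-- ===== PORT A =====
-- lower = {c: c.lower() for c in cols}
def pvLowerMap (cols : List String) : PySem.Dict String String :=
  cols.foldl (fun d c => d.insert c (PySem.Str.lower c)) PySem.Dict.empty

-- for target in pri: for c in cols: if lower[c] == target: return c
-- (lower[c] is always present since c ∈ cols; getD "" is exact on every reached lookup)
def pvAExact (pri : List String) (cols : List String) (lower : PySem.Dict String String) : Option String :=
  match pri with
  | [] => none
  | t :: ts =>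
    match cols.find? (fun c => lower.getD c "" == t) with
    | some c => some c
    | none => pvAExact ts cols lower

-- the contains-based fallback loop, consulting the lower dict
def pvAFallback (cols : List String) (lower : PySem.Dict String String) : Option String :=
  cols.find? (fun c =>
    let lc := lower.getD c ""
    (PySem.Str.isIn "item" lc && PySem.Str.isIn "code" lc) ||
    (PySem.Str.isIn "item" lc && PySem.Str.isIn "no" lc))

def pick_code_col_py (cols : List String) : String :=
  let pri := ["item code", "item no.", "item number", "itemno", "item"]
  let lower := pvLowerMap cols
  match pvAExact pri cols lower with
  | some c => c
  | none =>
    match pvAFallback cols lower with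
    | some c => c
    | none => (PySem.List.pyGet? cols 0).getD ""   -- cols[0]; IndexError on [] is excluded by Pre_

-- ===== PORT B =====
-- pri = [...] (closed over by rank)
def pvPriB : List String := ["item code", "item no.", "item number", "itemno", "item"]

-- def rank(c): lc = c.lower(); if lc in pri: return pri.index(lc); if "item" in lc and
-- ("code" in lc or "no" in lc): return len(pri); return len(pri) + 1
def pvRankB (c : String) : Nat :=
  let lc := PySem.Str.lower c
  if pvPriB.contains lc then (PySem.List.index? pvPriB lc).getD 0
  else if PySem.Str.isIn "item" lc && (PySem.Str.isIn "code" lc || PySem.Str.isIn "no" lc) then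
    pvPriB.length
  else pvPriB.length + 1

-- for c in cols[1:]: r = rank(c); if r < best_rank: best, best_rank = c, r
def pvBLoop : List String → String → Nat → String
  | [], best, _ => best
  | c :: cs, best, bestRank =>
    let r := pvRankB c
    if r < bestRank then pvBLoop cs c r else pvBLoop cs best bestRank

def pick_code_col_py_alt (cols : List String) : String :=
  match cols with
  | [] => ""                                        -- cols[0] raises IndexError; excluded by Pre_
  | c0 :: rest => pvBLoop rest c0 (pvRankB c0)      -- best = cols[0]; loop over cols[1:]

-- ===== PRECONDITION & SPEC =====
-- Pre_ excludes only the empty list, on which the Python A (and B) raises IndexError at cols[0].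
def Pre_pick_code_col_py (cols : List String) : Prop := cols ≠ []
instance (cols : List String) : Decidable (Pre_pick_code_col_py cols) := by unfold Pre_pick_code_col_py; infer_instance
def pvWitness_pick_code_col_py : List String := ["Name", "Item Code"]

def Spec_pick_code_col_py (cols : List String) (out : String) : Prop := out = pick_code_col_py_alt cols
instance (cols : List String) (out : String) : Decidable (Spec_pick_code_col_py cols out) := by unfold Spec_pick_code_col_py; infer_instance

-- ===== CLAIM (what is proved, stated in full; the proofs are below) =====
def Claim_equal_pick_code_col_py : Prop := ∀ (cols : List String), Dom_pick_code_col_py cols → Pre_pick_code_col_py cols → Spec_pick_code_col_py cols (pick_code_col_py cols)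

-- ===== LEMMAS AND PROOFS =====

-- the fallback pattern, as a Boolean on the lowercased name
def pvCond (lc : String) : Bool :=
  PySem.Str.isIn "item" lc && (PySem.Str.isIn "code" lc || PySem.Str.isIn "no" lc)

-- the running minimum of the ranks, as B's loop maintains it
def pvMinR (rest : List String) (r : Nat) : Nat :=
  rest.foldl (fun m c => min m (pvRankB c)) r

-- rank as an if-chain over the lowercased name
theorem pvRankB_eq (c : String) :
    pvRankB c =
      (if PySem.Str.lower c = "item code" then 0
       else if PySem.Str.lower c = "item no." then 1
       else if PySem.Str.lower c = "item number" then 2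
       else if PySem.Str.lower c = "itemno" then 3
       else if PySem.Str.lower c = "item" then 4
       else if pvCond (PySem.Str.lower c) then 5 else 6) := by
  simp only [pvRankB, pvPriB, pvCond]
  generalize PySem.Str.lower c = lc
  by_cases h0 : lc = "item code"
  · subst h0; decide
  by_cases h1 : lc = "item no."
  · subst h1; decide
  by_cases h2 : lc = "item number"
  · subst h2; decide
  by_cases h3 : lc = "itemno"
  · subst h3; decide
  by_cases h4 : lc = "item"
  · subst h4; decide
  simp [h0, h1, h2, h3, h4]

theorem pvRankB_le (c : String) : pvRankB c ≤ 6 := by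
  rw [pvRankB_eq]; split_ifs <;> omega

-- A's lower dict looked up at a member is that member's lower()
theorem pv_lower_fold_getD_not_mem (as : List String) (d : PySem.Dict String String)
    (c : String) (h : c ∉ as) :
    (as.foldl (fun d c => d.insert c (PySem.Str.lower c)) d).getD c "" = d.getD c "" := by
  induction as generalizing d with
  | nil => rfl
  | cons a t ih =>
    simp only [List.foldl_cons]
    rw [ih _ (fun hm => h (List.mem_cons_of_mem _ hm)), PySem.Dict.getD_insert]
    simp only [List.mem_cons, not_or] at h
    simp [h.1]

theorem pv_lower_getD (cols : List String) (c : String) (h : c ∈ cols) :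
    (pvLowerMap cols).getD c "" = PySem.Str.lower c := by
  unfold pvLowerMap
  generalize PySem.Dict.empty = d
  induction cols generalizing d with
  | nil => cases h
  | cons a t ih =>
    simp only [List.foldl_cons]
    by_cases ht : c ∈ t
    · exact ih ht _
    · have hc : c = a := by
        rcases List.mem_cons.mp h with h1 | h2
        · exact h1
        · exact absurd h2 ht
      subst hc
      rw [pv_lower_fold_getD_not_mem _ _ _ ht, PySem.Dict.getD_insert]
      simp

-- find? only evaluates its predicate on members
theorem pv_find?_congr {α : Type} (l : List α) (p q : α → Bool)
    (h : ∀ x ∈ l, p x = q x) : l.find? p = l.find? q := by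
  induction l with
  | nil => rfl
  | cons a t ih =>
    simp only [List.find?_cons]
    rw [h a (List.mem_cons_self)]
    cases q a
    · exact ih (fun x hx => h x (List.mem_cons_of_mem _ hx))
    · rfl

-- lower c = pri[i]  ↔  rank c = i, pointwise, for each concrete target
theorem pv_target0 (c : String) : (PySem.Str.lower c == "item code") = (pvRankB c == 0) := by
  rw [pvRankB_eq]
  generalize PySem.Str.lower c = lc
  split_ifs with h0 h1 h2 h3 h4 h5 <;> simp_all
theorem pv_target1 (c : String) : (PySem.Str.lower c == "item no.") = (pvRankB c == 1) := by
  rw [pvRankB_eq]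
  generalize PySem.Str.lower c = lc
  split_ifs with h0 h1 h2 h3 h4 h5 <;> simp_all
theorem pv_target2 (c : String) : (PySem.Str.lower c == "item number") = (pvRankB c == 2) := by
  rw [pvRankB_eq]
  generalize PySem.Str.lower c = lc
  split_ifs with h0 h1 h2 h3 h4 h5 <;> simp_all
theorem pv_target3 (c : String) : (PySem.Str.lower c == "itemno") = (pvRankB c == 3) := by
  rw [pvRankB_eq]
  generalize PySem.Str.lower c = lc
  split_ifs with h0 h1 h2 h3 h4 h5 <;> simp_all
theorem pv_target4 (c : String) : (PySem.Str.lower c == "item") = (pvRankB c == 4) := by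
  rw [pvRankB_eq]
  generalize PySem.Str.lower c = lc
  split_ifs with h0 h1 h2 h3 h4 h5 <;> simp_all
-- under "no exact match anywhere", the fallback pattern is exactly rank = 5
theorem pv_cond_eq_rank5 (c : String) (h : 5 ≤ pvRankB c) :
    pvCond (PySem.Str.lower c) = (pvRankB c == 5) := by
  rw [pvRankB_eq] at h ⊢
  generalize PySem.Str.lower c = lc at *
  split_ifs at h ⊢ <;> simp_all

-- pvMinR facts: it is a lower bound and it is attained
theorem pvMinR_le_init (rest : List String) (r : Nat) : pvMinR rest r ≤ r := by
  induction rest generalizing r with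
  | nil => exact le_rfl
  | cons c cs ih =>
    simp only [pvMinR, List.foldl_cons] at *
    exact le_trans (ih _) (Nat.min_le_left _ _)

theorem pvMinR_le_mem (rest : List String) (r : Nat) (c : String) (h : c ∈ rest) :
    pvMinR rest r ≤ pvRankB c := by
  induction rest generalizing r with
  | nil => cases h
  | cons a cs ih =>
    rcases List.mem_cons.mp h with h1 | h2
    · subst h1
      simp only [pvMinR, List.foldl_cons]
      exact le_trans (pvMinR_le_init cs _) (Nat.min_le_right _ _)
    · simpa only [pvMinR, List.foldl_cons] using ih _ h2

theorem pvMinR_attained (rest : List String) (r : Nat) :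
    pvMinR rest r = r ∨ ∃ c ∈ rest, pvMinR rest r = pvRankB c := by
  induction rest generalizing r with
  | nil => exact Or.inl rfl
  | cons a cs ih =>
    simp only [pvMinR, List.foldl_cons]
    rcases ih (min r (pvRankB a)) with h | ⟨c, hc, hr⟩
    · simp only [pvMinR] at h
      rcases Nat.le_total r (pvRankB a) with hle | hle
      · left; rw [h]; exact Nat.min_eq_left hle
      · right; exact ⟨a, List.mem_cons_self, by rw [h]; exact Nat.min_eq_right hle⟩
    · simp only [pvMinR] at hr
      right; exact ⟨c, List.mem_cons_of_mem _ hc, hr⟩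

-- B's loop returns the first element of best :: rest achieving the running minimum
theorem pvBLoop_eq_find (rest : List String) (b : String) :
    (b :: rest).find? (fun c => pvRankB c == pvMinR rest (pvRankB b)) =
      some (pvBLoop rest b (pvRankB b)) := by
  induction rest generalizing b with
  | nil => simp [pvBLoop, pvMinR]
  | cons c cs ih =>
    by_cases h : pvRankB c < pvRankB b
    · have hmin : pvMinR (c :: cs) (pvRankB b) = pvMinR cs (pvRankB c) := by
        simp only [pvMinR, List.foldl_cons]
        rw [Nat.min_eq_right (Nat.le_of_lt h)]
      have hbne : (pvRankB b == pvMinR cs (pvRankB c)) = false := by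
        have := pvMinR_le_init cs (pvRankB c)
        exact beq_eq_false_iff_ne.mpr (by omega)
      have hloop : pvBLoop (c :: cs) b (pvRankB b) = pvBLoop cs c (pvRankB c) := by
        simp [pvBLoop, h]
      rw [hloop, hmin, List.find?_cons, hbne]
      exact ih c
    · have hmin : pvMinR (c :: cs) (pvRankB b) = pvMinR cs (pvRankB b) := by
        simp only [pvMinR, List.foldl_cons]
        rw [Nat.min_eq_left (by omega)]
      have hloop : pvBLoop (c :: cs) b (pvRankB b) = pvBLoop cs b (pvRankB b) := by
        simp [pvBLoop, h]
      rw [hloop, hmin]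
      have := ih b
      rw [List.find?_cons] at this ⊢
      cases hb : (pvRankB b == pvMinR cs (pvRankB b)) with
      | true => rw [hb] at this; exact this
      | false =>
        rw [hb] at this
        have hcne : (pvRankB c == pvMinR cs (pvRankB b)) = false := by
          have h1 := pvMinR_le_init cs (pvRankB b)
          have h2 : pvRankB b ≠ pvMinR cs (pvRankB b) := beq_eq_false_iff_ne.mp hb
          exact beq_eq_false_iff_ne.mpr (by omega)
        rw [List.find?_cons, hcne]
        exact this

-- if rank = i is found first (all ranks ≥ i), the found element is the first rank-minimal one
theorem pv_step (cols : List String) (i : Nat) (c : String) (c0 : String) (rest : List String)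
    (hc : cols = c0 :: rest)
    (hle : ∀ x ∈ cols, i ≤ pvRankB x)
    (hf : cols.find? (fun x => pvRankB x == i) = some c) :
    cols.find? (fun x => pvRankB x == pvMinR rest (pvRankB c0)) = some c := by
  have hmem := List.mem_of_find?_eq_some hf
  have hrc : pvRankB c = i := by
    have := List.find?_some hf
    exact beq_iff_eq.mp this
  have hmi : pvMinR rest (pvRankB c0) = i := by
    have h1 : pvMinR rest (pvRankB c0) ≤ i := by
      rw [hc] at hmem
      rcases List.mem_cons.mp hmem with h1 | h2
      · rw [← hrc, h1]; exact pvMinR_le_init _ _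
      · rw [← hrc]; exact pvMinR_le_mem _ _ _ h2
    have h2 : i ≤ pvMinR rest (pvRankB c0) := by
      rcases pvMinR_attained rest (pvRankB c0) with h | ⟨x, hx, hxe⟩
      · rw [h]; exact hle c0 (by rw [hc]; exact List.mem_cons_self)
      · rw [hxe]; exact hle x (by rw [hc]; exact List.mem_cons_of_mem _ hx)
    omega
  rw [hmi]; exact hf

theorem pv_next (cols : List String) (i : Nat)
    (hle : ∀ x ∈ cols, i ≤ pvRankB x)
    (hf : cols.find? (fun x => pvRankB x == i) = none) :
    ∀ x ∈ cols, i + 1 ≤ pvRankB x := by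
  intro x hx
  have := List.find?_eq_none.mp hf x hx
  have hne : pvRankB x ≠ i := fun he => this (beq_iff_eq.mpr he)
  have := hle x hx
  omega

-- ===== VERDICT (by name: the statement is the Claim_ definition above) =====
-- match the fallback predicate's Boolean shape to pvCond
theorem pv_bool_factor (a b c : Bool) : (a && b || a && c) = (a && (b || c)) := by
  cases a <;> cases b <;> cases c <;> rfl

theorem pick_code_col_py_spec : Claim_equal_pick_code_col_py := by
  intro cols _ hpre
  unfold Spec_pick_code_col_py
  obtain ⟨c0, rest, rfl⟩ : ∃ c0 rest, cols = c0 :: rest := by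
    cases cols with
    | nil => exact absurd rfl hpre
    | cons a t => exact ⟨a, t, rfl⟩
  have hBfind := pvBLoop_eq_find rest c0
  have hB : pick_code_col_py_alt (c0 :: rest) = pvBLoop rest c0 (pvRankB c0) := rfl
  -- rewrite each of A's scans into a scan for a concrete rank
  have e0 : (c0 :: rest).find? (fun c => (pvLowerMap (c0 :: rest)).getD c "" == "item code") =
      (c0 :: rest).find? (fun c => pvRankB c == 0) :=
    pv_find?_congr _ _ _ (fun c hc => by rw [pv_lower_getD _ _ hc, pv_target0])
  have e1 : (c0 :: rest).find? (fun c => (pvLowerMap (c0 :: rest)).getD c "" == "item no.") =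
      (c0 :: rest).find? (fun c => pvRankB c == 1) :=
    pv_find?_congr _ _ _ (fun c hc => by rw [pv_lower_getD _ _ hc, pv_target1])
  have e2 : (c0 :: rest).find? (fun c => (pvLowerMap (c0 :: rest)).getD c "" == "item number") =
      (c0 :: rest).find? (fun c => pvRankB c == 2) :=
    pv_find?_congr _ _ _ (fun c hc => by rw [pv_lower_getD _ _ hc, pv_target2])
  have e3 : (c0 :: rest).find? (fun c => (pvLowerMap (c0 :: rest)).getD c "" == "itemno") =
      (c0 :: rest).find? (fun c => pvRankB c == 3) :=
    pv_find?_congr _ _ _ (fun c hc => by rw [pv_lower_getD _ _ hc, pv_target3])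
  have e4 : (c0 :: rest).find? (fun c => (pvLowerMap (c0 :: rest)).getD c "" == "item") =
      (c0 :: rest).find? (fun c => pvRankB c == 4) :=
    pv_find?_congr _ _ _ (fun c hc => by rw [pv_lower_getD _ _ hc, pv_target4])
  simp only [pick_code_col_py, pvAExact, e0, e1, e2, e3, e4]
  have hle0 : ∀ x ∈ (c0 :: rest), 0 ≤ pvRankB x := fun x _ => Nat.zero_le _
  cases h0 : (c0 :: rest).find? (fun c => pvRankB c == 0) with
  | some c =>
    rw [pv_step _ 0 c c0 rest rfl hle0 h0] at hBfind
    simp only [hB, Option.some.injEq] at hBfind ⊢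
    exact hBfind
  | none =>
  have hle1 := pv_next _ 0 hle0 h0
  cases h1 : (c0 :: rest).find? (fun c => pvRankB c == 1) with
  | some c =>
    rw [pv_step _ 1 c c0 rest rfl hle1 h1] at hBfind
    simp only [hB, Option.some.injEq] at hBfind ⊢
    exact hBfind
  | none =>
  have hle2 := pv_next _ 1 hle1 h1
  cases h2 : (c0 :: rest).find? (fun c => pvRankB c == 2) with
  | some c =>
    rw [pv_step _ 2 c c0 rest rfl hle2 h2] at hBfind
    simp only [hB, Option.some.injEq] at hBfind ⊢
    exact hBfind
  | none =>
  have hle3 := pv_next _ 2 hle2 h2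
  cases h3 : (c0 :: rest).find? (fun c => pvRankB c == 3) with
  | some c =>
    rw [pv_step _ 3 c c0 rest rfl hle3 h3] at hBfind
    simp only [hB, Option.some.injEq] at hBfind ⊢
    exact hBfind
  | none =>
  have hle4 := pv_next _ 3 hle3 h3
  cases h4 : (c0 :: rest).find? (fun c => pvRankB c == 4) with
  | some c =>
    rw [pv_step _ 4 c c0 rest rfl hle4 h4] at hBfind
    simp only [hB, Option.some.injEq] at hBfind ⊢
    exact hBfind
  | none =>
  have hle5 := pv_next _ 4 hle4 h4
  -- the fallback scan is the rank-5 scan once no exact target occurs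
  have e5 : pvAFallback (c0 :: rest) (pvLowerMap (c0 :: rest)) =
      (c0 :: rest).find? (fun c => pvRankB c == 5) := by
    unfold pvAFallback
    refine pv_find?_congr _ _ _ (fun c hc => ?_)
    rw [pv_lower_getD _ _ hc, pv_bool_factor, ← pvCond, pv_cond_eq_rank5 c (hle5 c hc)]
  rw [e5]
  cases h5 : (c0 :: rest).find? (fun c => pvRankB c == 5) with
  | some c =>
    rw [pv_step _ 5 c c0 rest rfl hle5 h5] at hBfind
    simp only [hB, Option.some.injEq] at hBfind ⊢
    exact hBfind
  | none =>
  have hle6 := pv_next _ 5 hle5 h5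
  -- every rank is 6, so the running minimum is 6 and B's first-minimal element is c0
  have hm : pvMinR rest (pvRankB c0) = 6 := by
    rcases pvMinR_attained rest (pvRankB c0) with h | ⟨x, hx, hxe⟩
    · have := hle6 c0 (List.mem_cons_self)
      have := pvRankB_le c0
      omega
    · have := hle6 x (List.mem_cons_of_mem _ hx)
      have := pvRankB_le x
      omega
  have hc0 : (pvRankB c0 == pvMinR rest (pvRankB c0)) = true := by
    have h1 := hle6 c0 (List.mem_cons_self)
    have h2 := pvRankB_le c0
    rw [hm]
    exact beq_iff_eq.mpr (by omega)
  rw [List.find?_cons, hc0] at hBfind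
  simp only [hB, Option.some.injEq] at hBfind ⊢
  rw [← hBfind]
  simp [PySem.List.pyGet?, PySem.List.pyIdx?]
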